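-- pv_equiv track=rewrite | github.com/Romzes/HappyLC | MainProject/Companies/Yandex/CountCommonElementsForPrefixes.py | calc_nums
-- ===== SOURCE A (Python) =====
-- def calc_nums(arr1, arr2):
--     n = len(arr1)
--     res_arr = n * [0]
--     stat1, stat2 = {}, {}
--     for i in range(n):
--         v1, v2 = arr1[i], arr2[i]
--         if v1 not in stat1: stat1[v1] = i
--         if v2 not in stat2: stat2[v2] = i
--         cnt = 0
--         if max(stat1[v1], stat2.get(v1, n)) == i: cnt += 1
--         if v2 != v1 and max(stat2[v2], stat1.get(v2, n)) == i: cnt += 1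
--         if i > 0: res_arr[i] += res_arr[i - 1]
--         res_arr[i] += cnt
--     return res_arr
-- ===== SOURCE B (Python) =====
-- def calc_nums(arr1, arr2):
--     # For each prefix length, recompute the number of distinct common values from scratch.
--     return [len(set(arr1[:i + 1]) & set(arr2[:i + 1])) for i in range(len(arr1))]
-- ===== Notes on version B (the rewrite author's own statement) =====
-- stated objective: simpler
-- what changed: B abandons A's incremental machinery (first-occurrence index dicts, max-of-indices==i tests, in-place cumulative array) and just recomputes each answer from scratch: for every prefix length it takes the two prefix slices and returns the size of the intersection of their sets, a one-line comprehension; this is quadratic, trading speed for directness.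
import Mathlib
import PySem

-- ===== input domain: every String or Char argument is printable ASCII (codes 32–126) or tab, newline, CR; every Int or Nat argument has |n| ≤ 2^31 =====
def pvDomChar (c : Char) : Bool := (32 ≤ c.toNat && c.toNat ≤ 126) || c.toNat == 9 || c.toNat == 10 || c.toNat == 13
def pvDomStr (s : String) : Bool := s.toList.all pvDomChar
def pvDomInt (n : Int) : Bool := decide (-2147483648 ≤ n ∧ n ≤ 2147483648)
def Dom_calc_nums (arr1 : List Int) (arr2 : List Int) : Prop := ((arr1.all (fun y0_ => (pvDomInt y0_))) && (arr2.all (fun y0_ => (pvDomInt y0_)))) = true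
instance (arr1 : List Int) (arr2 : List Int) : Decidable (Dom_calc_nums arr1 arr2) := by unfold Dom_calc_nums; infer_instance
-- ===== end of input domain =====

-- B replaces A's incremental pass (first-occurrence index dicts, max-of-indices tests,
-- in-place cumulative array) by a per-prefix brute-force recomputation: the size of the
-- intersection of the two prefix sets (objective: simpler; quadratic instead of linear).

-- ===== PORT A =====
-- loop body of A's 'for i in range(n)': state = (res_arr, stat1, stat2)
def calcStepA (arr1 : List Int) (arr2 : List Int) (n : Nat)
    (st : List Int × PySem.Dict Int Int × PySem.Dict Int Int) (i : Nat) :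
    List Int × PySem.Dict Int Int × PySem.Dict Int Int :=
  let res := st.1
  let st1 := st.2.1
  let st2 := st.2.2
  let v1 := PySem.List.pyGetD arr1 (i : Int) 0   -- arr1[i] (in range: i < n = len(arr1))
  let v2 := PySem.List.pyGetD arr2 (i : Int) 0   -- arr2[i] (in range under Pre_, else Python raises)
  let st1 := if st1.contains v1 then st1 else st1.insert v1 (i : Int)
  let st2 := if st2.contains v2 then st2 else st2.insert v2 (i : Int)
  let cnt : Int := 0
  let cnt := if max (st1.getD v1 0) (st2.getD v1 (n : Int)) = (i : Int) then cnt + 1 else cnt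
  let cnt := if v2 ≠ v1 ∧ max (st2.getD v2 0) (st1.getD v2 (n : Int)) = (i : Int) then cnt + 1 else cnt
  let res := if (i : Int) > 0 then
      PySem.List.pySetD res (i : Int) (PySem.List.pyGetD res (i : Int) 0 + PySem.List.pyGetD res ((i : Int) - 1) 0)
    else res
  let res := PySem.List.pySetD res (i : Int) (PySem.List.pyGetD res (i : Int) 0 + cnt)
  (res, st1, st2)

def calc_nums (arr1 : List Int) (arr2 : List Int) : List Int :=
  let n := arr1.length
  ((List.range n).foldl (calcStepA arr1 arr2 n)
      (List.replicate n 0, PySem.Dict.empty, PySem.Dict.empty)).1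

-- ===== PORT B =====
-- B's comprehension: [len(set(arr1[:i+1]) & set(arr2[:i+1])) for i in range(len(arr1))]
def calc_nums_alt (arr1 : List Int) (arr2 : List Int) : List Int :=
  (PySem.List.pyRange 0 (arr1.length : Int)).map (fun i =>
    PySem.Set.len (PySem.Set.inter
      (PySem.Set.ofList (PySem.List.slice arr1 none (some (i + 1))))
      (PySem.Set.ofList (PySem.List.slice arr2 none (some (i + 1))))))

-- ===== PRECONDITION & SPEC =====
-- Pre_ excludes exactly the inputs with len(arr2) < len(arr1), on which A raises IndexError.
def Pre_calc_nums (arr1 : List Int) (arr2 : List Int) : Prop := arr1.length ≤ arr2.length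
instance (arr1 : List Int) (arr2 : List Int) : Decidable (Pre_calc_nums arr1 arr2) := by
  unfold Pre_calc_nums; infer_instance
def pvWitness_calc_nums : List Int × List Int := ([1, 2, 2, 3], [2, 1, 3, 3])

def Spec_calc_nums (arr1 : List Int) (arr2 : List Int) (out : List Int) : Prop := out = calc_nums_alt arr1 arr2
instance (arr1 : List Int) (arr2 : List Int) (out : List Int) : Decidable (Spec_calc_nums arr1 arr2 out) := by unfold Spec_calc_nums; infer_instance

-- ===== CLAIM (what is proved, stated in full; the proofs are below) =====
def Claim_equal_calc_nums : Prop := ∀ (arr1 : List Int) (arr2 : List Int), Dom_calc_nums arr1 arr2 → Pre_calc_nums arr1 arr2 → Spec_calc_nums arr1 arr2 (calc_nums arr1 arr2)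

-- ===== LEMMAS AND PROOFS =====

-- the number of distinct values common to the two k-prefixes (what B computes at index k-1)
def prefC (arr1 arr2 : List Int) (k : Nat) : Int :=
  ((PySem.Set.inter (PySem.Set.ofList (arr1.take k)) (PySem.Set.ofList (arr2.take k))).length : Int)

-- by how much the common-distinct count grows when v1 joins prefix 1 and v2 joins prefix 2
def cdelta (P1 P2 : List Int) (v1 v2 : Int) : Int :=
  if v1 = v2 then (if v1 ∈ P1 ∧ v1 ∈ P2 then 0 else 1)
  else (if v1 ∉ P1 ∧ v1 ∈ P2 then 1 else 0) + (if v2 ∈ P1 ∧ v2 ∉ P2 then 1 else 0)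

theorem getD_of_contains_bound (d : PySem.Dict Int Int) (k : Nat)
    (hb : ∀ x j, d.get? x = some j → 0 ≤ j ∧ j < (k : Int)) (x : Int) (d0 : Int)
    (hc : d.contains x = true) : 0 ≤ d.getD x d0 ∧ d.getD x d0 < (k : Int) := by
  rw [PySem.Dict.contains_eq_isSome_get?] at hc
  cases hj : d.get? x with
  | none => rw [hj] at hc; simp at hc
  | some j => rw [PySem.Dict.getD_of_get?_eq_some d d0 hj]; exact hb x j hj

theorem contains_condInsert_mem (d : PySem.Dict Int Int) (P : List Int)
    (h : ∀ x, d.contains x = decide (x ∈ P)) (v kv x : Int) :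
    (if d.contains v then d else d.insert v kv).contains x = decide (x ∈ P ++ [v]) := by
  by_cases hv : d.contains v = true
  · have hvP : v ∈ P := by
      have hvv := h v; rw [hv] at hvv; exact of_decide_eq_true hvv.symm
    rw [if_pos hv, h x, decide_eq_decide]
    simp only [List.mem_append, List.mem_singleton]
    constructor
    · exact fun h' => Or.inl h'
    · rintro (h' | rfl)
      · exact h'
      · exact hvP
  · rw [if_neg hv, PySem.Dict.contains_insert, h x]
    by_cases hx : x = v
    · subst hx; simp
    · simp [hx]

theorem bound_condInsert (d : PySem.Dict Int Int) (k : Nat)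
    (hb : ∀ x j, d.get? x = some j → 0 ≤ j ∧ j < (k : Int)) (v : Int) :
    ∀ x j, (if d.contains v then d else d.insert v (k : Int)).get? x = some j →
      0 ≤ j ∧ j < ((k + 1 : Nat) : Int) := by
  intro x j hj
  have : 0 ≤ j ∧ j ≤ (k : Int) := by
    by_cases hv : d.contains v = true
    · simp [hv] at hj; have := hb x j hj; omega
    · simp [hv, PySem.Dict.get?_insert] at hj
      by_cases hx : x = v
      · simp [hx] at hj; omega
      · simp [hx] at hj; have := hb x j hj; omega
  push_cast; omega

-- A's per-step cnt, computed from the first-occurrence dicts, equals cdelta of the prefixes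
theorem cntA_eq (d1 d2 : PySem.Dict Int Int) (P1 P2 : List Int) (k n : Nat) (hkn : k < n)
    (hk1 : ∀ x, d1.contains x = decide (x ∈ P1)) (hk2 : ∀ x, d2.contains x = decide (x ∈ P2))
    (hb1 : ∀ x j, d1.get? x = some j → 0 ≤ j ∧ j < (k : Int))
    (hb2 : ∀ x j, d2.get? x = some j → 0 ≤ j ∧ j < (k : Int))
    (v1 v2 : Int) :
    (let d1' := if d1.contains v1 then d1 else d1.insert v1 (k : Int)
     let d2' := if d2.contains v2 then d2 else d2.insert v2 (k : Int)
     let cnt : Int := 0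
     let cnt := if max (d1'.getD v1 0) (d2'.getD v1 (n : Int)) = (k : Int) then cnt + 1 else cnt
     let cnt := if v2 ≠ v1 ∧ max (d2'.getD v2 0) (d1'.getD v2 (n : Int)) = (k : Int) then cnt + 1 else cnt
     cnt) = cdelta P1 P2 v1 v2 := by
  have hkn' : (k : Int) < (n : Int) := by exact_mod_cast hkn
  dsimp only
  by_cases hv : v1 = v2
  · subst hv
    by_cases m1 : v1 ∈ P1 <;> by_cases m2 : v1 ∈ P2
    · -- m1=True m2=True
      have c1 : d1.contains v1 = true := by rw [hk1 v1]; exact decide_eq_true m1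
      have c2 : d2.contains v1 = true := by rw [hk2 v1]; exact decide_eq_true m2
      rw [if_pos c1]
      rw [if_pos c2]
      obtain ⟨a1l, a1u⟩ := getD_of_contains_bound d1 k hb1 v1 0 c1
      obtain ⟨b1l, b1u⟩ := getD_of_contains_bound d2 k hb2 v1 ((n : Nat) : Int) c2
      have hcd : cdelta P1 P2 v1 v1 = 0 := by simp [cdelta, m1, m2]
      rw [hcd]
      simp only [ne_eq, not_true_eq_false, false_and, if_false]
      split_ifs <;> omega
    · -- m1=True m2=False
      have c1 : d1.contains v1 = true := by rw [hk1 v1]; exact decide_eq_true m1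
      have c2 : d2.contains v1 = false := by rw [hk2 v1]; exact decide_eq_false m2
      rw [if_pos c1]
      have c2' : ¬ (d2.contains v1 = true) := by simp [c2]
      rw [if_neg c2']
      obtain ⟨a1l, a1u⟩ := getD_of_contains_bound d1 k hb1 v1 0 c1
      rw [PySem.Dict.getD_insert_self d2 v1 ((k : Nat) : Int) ((n : Nat) : Int)]
      have hcd : cdelta P1 P2 v1 v1 = 1 := by simp [cdelta, m1, m2]
      rw [hcd]
      simp only [ne_eq, not_true_eq_false, false_and, if_false]
      split_ifs <;> omega
    · -- m1=False m2=True
      have c1 : d1.contains v1 = false := by rw [hk1 v1]; exact decide_eq_false m1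
      have c2 : d2.contains v1 = true := by rw [hk2 v1]; exact decide_eq_true m2
      have c1' : ¬ (d1.contains v1 = true) := by simp [c1]
      rw [if_neg c1']
      rw [if_pos c2]
      rw [PySem.Dict.getD_insert_self d1 v1 ((k : Nat) : Int) 0]
      obtain ⟨b1l, b1u⟩ := getD_of_contains_bound d2 k hb2 v1 ((n : Nat) : Int) c2
      have hcd : cdelta P1 P2 v1 v1 = 1 := by simp [cdelta, m1, m2]
      rw [hcd]
      simp only [ne_eq, not_true_eq_false, false_and, if_false]
      split_ifs <;> omega
    · -- m1=False m2=False
      have c1 : d1.contains v1 = false := by rw [hk1 v1]; exact decide_eq_false m1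
      have c2 : d2.contains v1 = false := by rw [hk2 v1]; exact decide_eq_false m2
      have c1' : ¬ (d1.contains v1 = true) := by simp [c1]
      rw [if_neg c1']
      have c2' : ¬ (d2.contains v1 = true) := by simp [c2]
      rw [if_neg c2']
      rw [PySem.Dict.getD_insert_self d1 v1 ((k : Nat) : Int) 0]
      rw [PySem.Dict.getD_insert_self d2 v1 ((k : Nat) : Int) ((n : Nat) : Int)]
      have hcd : cdelta P1 P2 v1 v1 = 1 := by simp [cdelta, m1, m2]
      rw [hcd]
      simp only [ne_eq, not_true_eq_false, false_and, if_false]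
      split_ifs <;> omega
  · by_cases m1 : v1 ∈ P1 <;> by_cases m12 : v1 ∈ P2 <;> by_cases m21 : v2 ∈ P1 <;> by_cases m2 : v2 ∈ P2
    · -- m1=True m12=True m21=True m2=True
      have c1 : d1.contains v1 = true := by rw [hk1 v1]; exact decide_eq_true m1
      have c2 : d2.contains v2 = true := by rw [hk2 v2]; exact decide_eq_true m2
      have c12 : d2.contains v1 = true := by rw [hk2 v1]; exact decide_eq_true m12
      have c21 : d1.contains v2 = true := by rw [hk1 v2]; exact decide_eq_true m21
      rw [if_pos c1]
      rw [if_pos c2]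
      obtain ⟨a1l, a1u⟩ := getD_of_contains_bound d1 k hb1 v1 0 c1
      obtain ⟨a2l, a2u⟩ := getD_of_contains_bound d2 k hb2 v2 0 c2
      obtain ⟨b1l, b1u⟩ := getD_of_contains_bound d2 k hb2 v1 ((n : Nat) : Int) c12
      obtain ⟨b2l, b2u⟩ := getD_of_contains_bound d1 k hb1 v2 ((n : Nat) : Int) c21
      have hcd : cdelta P1 P2 v1 v2 = 0 := by simp [cdelta, hv, m1, m12, m21, m2]
      rw [hcd]
      split_ifs <;> omega
    · -- m1=True m12=True m21=True m2=False
      have c1 : d1.contains v1 = true := by rw [hk1 v1]; exact decide_eq_true m1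
      have c2 : d2.contains v2 = false := by rw [hk2 v2]; exact decide_eq_false m2
      have c12 : d2.contains v1 = true := by rw [hk2 v1]; exact decide_eq_true m12
      have c21 : d1.contains v2 = true := by rw [hk1 v2]; exact decide_eq_true m21
      rw [if_pos c1]
      have c2' : ¬ (d2.contains v2 = true) := by simp [c2]
      rw [if_neg c2']
      obtain ⟨a1l, a1u⟩ := getD_of_contains_bound d1 k hb1 v1 0 c1
      rw [PySem.Dict.getD_insert_self d2 v2 ((k : Nat) : Int) 0]
      rw [PySem.Dict.getD_insert_of_ne d2 ((k : Nat) : Int) ((n : Nat) : Int) hv]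
      obtain ⟨b1l, b1u⟩ := getD_of_contains_bound d2 k hb2 v1 ((n : Nat) : Int) c12
      obtain ⟨b2l, b2u⟩ := getD_of_contains_bound d1 k hb1 v2 ((n : Nat) : Int) c21
      have hcd : cdelta P1 P2 v1 v2 = 1 := by simp [cdelta, hv, m1, m12, m21, m2]
      rw [hcd]
      split_ifs <;> omega
    · -- m1=True m12=True m21=False m2=True
      have c1 : d1.contains v1 = true := by rw [hk1 v1]; exact decide_eq_true m1
      have c2 : d2.contains v2 = true := by rw [hk2 v2]; exact decide_eq_true m2
      have c12 : d2.contains v1 = true := by rw [hk2 v1]; exact decide_eq_true m12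
      have c21 : d1.contains v2 = false := by rw [hk1 v2]; exact decide_eq_false m21
      rw [if_pos c1]
      rw [if_pos c2]
      obtain ⟨a1l, a1u⟩ := getD_of_contains_bound d1 k hb1 v1 0 c1
      obtain ⟨a2l, a2u⟩ := getD_of_contains_bound d2 k hb2 v2 0 c2
      obtain ⟨b1l, b1u⟩ := getD_of_contains_bound d2 k hb2 v1 ((n : Nat) : Int) c12
      rw [PySem.Dict.getD_of_not_contains d1 ((n : Nat) : Int) c21]
      have hcd : cdelta P1 P2 v1 v2 = 0 := by simp [cdelta, hv, m1, m12, m21, m2]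
      rw [hcd]
      split_ifs <;> omega
    · -- m1=True m12=True m21=False m2=False
      have c1 : d1.contains v1 = true := by rw [hk1 v1]; exact decide_eq_true m1
      have c2 : d2.contains v2 = false := by rw [hk2 v2]; exact decide_eq_false m2
      have c12 : d2.contains v1 = true := by rw [hk2 v1]; exact decide_eq_true m12
      have c21 : d1.contains v2 = false := by rw [hk1 v2]; exact decide_eq_false m21
      rw [if_pos c1]
      have c2' : ¬ (d2.contains v2 = true) := by simp [c2]
      rw [if_neg c2']
      obtain ⟨a1l, a1u⟩ := getD_of_contains_bound d1 k hb1 v1 0 c1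
      rw [PySem.Dict.getD_insert_self d2 v2 ((k : Nat) : Int) 0]
      rw [PySem.Dict.getD_insert_of_ne d2 ((k : Nat) : Int) ((n : Nat) : Int) hv]
      obtain ⟨b1l, b1u⟩ := getD_of_contains_bound d2 k hb2 v1 ((n : Nat) : Int) c12
      rw [PySem.Dict.getD_of_not_contains d1 ((n : Nat) : Int) c21]
      have hcd : cdelta P1 P2 v1 v2 = 0 := by simp [cdelta, hv, m1, m12, m21, m2]
      rw [hcd]
      split_ifs <;> omega
    · -- m1=True m12=False m21=True m2=True
      have c1 : d1.contains v1 = true := by rw [hk1 v1]; exact decide_eq_true m1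
      have c2 : d2.contains v2 = true := by rw [hk2 v2]; exact decide_eq_true m2
      have c12 : d2.contains v1 = false := by rw [hk2 v1]; exact decide_eq_false m12
      have c21 : d1.contains v2 = true := by rw [hk1 v2]; exact decide_eq_true m21
      rw [if_pos c1]
      rw [if_pos c2]
      obtain ⟨a1l, a1u⟩ := getD_of_contains_bound d1 k hb1 v1 0 c1
      obtain ⟨a2l, a2u⟩ := getD_of_contains_bound d2 k hb2 v2 0 c2
      rw [PySem.Dict.getD_of_not_contains d2 ((n : Nat) : Int) c12]
      obtain ⟨b2l, b2u⟩ := getD_of_contains_bound d1 k hb1 v2 ((n : Nat) : Int) c21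
      have hcd : cdelta P1 P2 v1 v2 = 0 := by simp [cdelta, hv, m1, m12, m21, m2]
      rw [hcd]
      split_ifs <;> omega
    · -- m1=True m12=False m21=True m2=False
      have c1 : d1.contains v1 = true := by rw [hk1 v1]; exact decide_eq_true m1
      have c2 : d2.contains v2 = false := by rw [hk2 v2]; exact decide_eq_false m2
      have c12 : d2.contains v1 = false := by rw [hk2 v1]; exact decide_eq_false m12
      have c21 : d1.contains v2 = true := by rw [hk1 v2]; exact decide_eq_true m21
      rw [if_pos c1]
      have c2' : ¬ (d2.contains v2 = true) := by simp [c2]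
      rw [if_neg c2']
      obtain ⟨a1l, a1u⟩ := getD_of_contains_bound d1 k hb1 v1 0 c1
      rw [PySem.Dict.getD_insert_self d2 v2 ((k : Nat) : Int) 0]
      rw [PySem.Dict.getD_insert_of_ne d2 ((k : Nat) : Int) ((n : Nat) : Int) hv]
      rw [PySem.Dict.getD_of_not_contains d2 ((n : Nat) : Int) c12]
      obtain ⟨b2l, b2u⟩ := getD_of_contains_bound d1 k hb1 v2 ((n : Nat) : Int) c21
      have hcd : cdelta P1 P2 v1 v2 = 1 := by simp [cdelta, hv, m1, m12, m21, m2]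
      rw [hcd]
      split_ifs <;> omega
    · -- m1=True m12=False m21=False m2=True
      have c1 : d1.contains v1 = true := by rw [hk1 v1]; exact decide_eq_true m1
      have c2 : d2.contains v2 = true := by rw [hk2 v2]; exact decide_eq_true m2
      have c12 : d2.contains v1 = false := by rw [hk2 v1]; exact decide_eq_false m12
      have c21 : d1.contains v2 = false := by rw [hk1 v2]; exact decide_eq_false m21
      rw [if_pos c1]
      rw [if_pos c2]
      obtain ⟨a1l, a1u⟩ := getD_of_contains_bound d1 k hb1 v1 0 c1
      obtain ⟨a2l, a2u⟩ := getD_of_contains_bound d2 k hb2 v2 0 c2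
      rw [PySem.Dict.getD_of_not_contains d2 ((n : Nat) : Int) c12]
      rw [PySem.Dict.getD_of_not_contains d1 ((n : Nat) : Int) c21]
      have hcd : cdelta P1 P2 v1 v2 = 0 := by simp [cdelta, hv, m1, m12, m21, m2]
      rw [hcd]
      split_ifs <;> omega
    · -- m1=True m12=False m21=False m2=False
      have c1 : d1.contains v1 = true := by rw [hk1 v1]; exact decide_eq_true m1
      have c2 : d2.contains v2 = false := by rw [hk2 v2]; exact decide_eq_false m2
      have c12 : d2.contains v1 = false := by rw [hk2 v1]; exact decide_eq_false m12
      have c21 : d1.contains v2 = false := by rw [hk1 v2]; exact decide_eq_false m21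
      rw [if_pos c1]
      have c2' : ¬ (d2.contains v2 = true) := by simp [c2]
      rw [if_neg c2']
      obtain ⟨a1l, a1u⟩ := getD_of_contains_bound d1 k hb1 v1 0 c1
      rw [PySem.Dict.getD_insert_self d2 v2 ((k : Nat) : Int) 0]
      rw [PySem.Dict.getD_insert_of_ne d2 ((k : Nat) : Int) ((n : Nat) : Int) hv]
      rw [PySem.Dict.getD_of_not_contains d2 ((n : Nat) : Int) c12]
      rw [PySem.Dict.getD_of_not_contains d1 ((n : Nat) : Int) c21]
      have hcd : cdelta P1 P2 v1 v2 = 0 := by simp [cdelta, hv, m1, m12, m21, m2]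
      rw [hcd]
      split_ifs <;> omega
    · -- m1=False m12=True m21=True m2=True
      have c1 : d1.contains v1 = false := by rw [hk1 v1]; exact decide_eq_false m1
      have c2 : d2.contains v2 = true := by rw [hk2 v2]; exact decide_eq_true m2
      have c12 : d2.contains v1 = true := by rw [hk2 v1]; exact decide_eq_true m12
      have c21 : d1.contains v2 = true := by rw [hk1 v2]; exact decide_eq_true m21
      have c1' : ¬ (d1.contains v1 = true) := by simp [c1]
      rw [if_neg c1']
      rw [if_pos c2]
      rw [PySem.Dict.getD_insert_self d1 v1 ((k : Nat) : Int) 0]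
      rw [PySem.Dict.getD_insert_of_ne d1 ((k : Nat) : Int) ((n : Nat) : Int) (Ne.symm hv)]
      obtain ⟨a2l, a2u⟩ := getD_of_contains_bound d2 k hb2 v2 0 c2
      obtain ⟨b1l, b1u⟩ := getD_of_contains_bound d2 k hb2 v1 ((n : Nat) : Int) c12
      obtain ⟨b2l, b2u⟩ := getD_of_contains_bound d1 k hb1 v2 ((n : Nat) : Int) c21
      have hcd : cdelta P1 P2 v1 v2 = 1 := by simp [cdelta, hv, m1, m12, m21, m2]
      rw [hcd]
      split_ifs <;> omega
    · -- m1=False m12=True m21=True m2=False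
      have c1 : d1.contains v1 = false := by rw [hk1 v1]; exact decide_eq_false m1
      have c2 : d2.contains v2 = false := by rw [hk2 v2]; exact decide_eq_false m2
      have c12 : d2.contains v1 = true := by rw [hk2 v1]; exact decide_eq_true m12
      have c21 : d1.contains v2 = true := by rw [hk1 v2]; exact decide_eq_true m21
      have c1' : ¬ (d1.contains v1 = true) := by simp [c1]
      rw [if_neg c1']
      have c2' : ¬ (d2.contains v2 = true) := by simp [c2]
      rw [if_neg c2']
      rw [PySem.Dict.getD_insert_self d1 v1 ((k : Nat) : Int) 0]
      rw [PySem.Dict.getD_insert_of_ne d1 ((k : Nat) : Int) ((n : Nat) : Int) (Ne.symm hv)]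
      rw [PySem.Dict.getD_insert_self d2 v2 ((k : Nat) : Int) 0]
      rw [PySem.Dict.getD_insert_of_ne d2 ((k : Nat) : Int) ((n : Nat) : Int) hv]
      obtain ⟨b1l, b1u⟩ := getD_of_contains_bound d2 k hb2 v1 ((n : Nat) : Int) c12
      obtain ⟨b2l, b2u⟩ := getD_of_contains_bound d1 k hb1 v2 ((n : Nat) : Int) c21
      have hcd : cdelta P1 P2 v1 v2 = 2 := by simp [cdelta, hv, m1, m12, m21, m2]
      rw [hcd]
      split_ifs <;> omega
    · -- m1=False m12=True m21=False m2=True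
      have c1 : d1.contains v1 = false := by rw [hk1 v1]; exact decide_eq_false m1
      have c2 : d2.contains v2 = true := by rw [hk2 v2]; exact decide_eq_true m2
      have c12 : d2.contains v1 = true := by rw [hk2 v1]; exact decide_eq_true m12
      have c21 : d1.contains v2 = false := by rw [hk1 v2]; exact decide_eq_false m21
      have c1' : ¬ (d1.contains v1 = true) := by simp [c1]
      rw [if_neg c1']
      rw [if_pos c2]
      rw [PySem.Dict.getD_insert_self d1 v1 ((k : Nat) : Int) 0]
      rw [PySem.Dict.getD_insert_of_ne d1 ((k : Nat) : Int) ((n : Nat) : Int) (Ne.symm hv)]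
      obtain ⟨a2l, a2u⟩ := getD_of_contains_bound d2 k hb2 v2 0 c2
      obtain ⟨b1l, b1u⟩ := getD_of_contains_bound d2 k hb2 v1 ((n : Nat) : Int) c12
      rw [PySem.Dict.getD_of_not_contains d1 ((n : Nat) : Int) c21]
      have hcd : cdelta P1 P2 v1 v2 = 1 := by simp [cdelta, hv, m1, m12, m21, m2]
      rw [hcd]
      split_ifs <;> omega
    · -- m1=False m12=True m21=False m2=False
      have c1 : d1.contains v1 = false := by rw [hk1 v1]; exact decide_eq_false m1
      have c2 : d2.contains v2 = false := by rw [hk2 v2]; exact decide_eq_false m2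
      have c12 : d2.contains v1 = true := by rw [hk2 v1]; exact decide_eq_true m12
      have c21 : d1.contains v2 = false := by rw [hk1 v2]; exact decide_eq_false m21
      have c1' : ¬ (d1.contains v1 = true) := by simp [c1]
      rw [if_neg c1']
      have c2' : ¬ (d2.contains v2 = true) := by simp [c2]
      rw [if_neg c2']
      rw [PySem.Dict.getD_insert_self d1 v1 ((k : Nat) : Int) 0]
      rw [PySem.Dict.getD_insert_of_ne d1 ((k : Nat) : Int) ((n : Nat) : Int) (Ne.symm hv)]
      rw [PySem.Dict.getD_insert_self d2 v2 ((k : Nat) : Int) 0]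
      rw [PySem.Dict.getD_insert_of_ne d2 ((k : Nat) : Int) ((n : Nat) : Int) hv]
      obtain ⟨b1l, b1u⟩ := getD_of_contains_bound d2 k hb2 v1 ((n : Nat) : Int) c12
      rw [PySem.Dict.getD_of_not_contains d1 ((n : Nat) : Int) c21]
      have hcd : cdelta P1 P2 v1 v2 = 1 := by simp [cdelta, hv, m1, m12, m21, m2]
      rw [hcd]
      split_ifs <;> omega
    · -- m1=False m12=False m21=True m2=True
      have c1 : d1.contains v1 = false := by rw [hk1 v1]; exact decide_eq_false m1
      have c2 : d2.contains v2 = true := by rw [hk2 v2]; exact decide_eq_true m2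
      have c12 : d2.contains v1 = false := by rw [hk2 v1]; exact decide_eq_false m12
      have c21 : d1.contains v2 = true := by rw [hk1 v2]; exact decide_eq_true m21
      have c1' : ¬ (d1.contains v1 = true) := by simp [c1]
      rw [if_neg c1']
      rw [if_pos c2]
      rw [PySem.Dict.getD_insert_self d1 v1 ((k : Nat) : Int) 0]
      rw [PySem.Dict.getD_insert_of_ne d1 ((k : Nat) : Int) ((n : Nat) : Int) (Ne.symm hv)]
      obtain ⟨a2l, a2u⟩ := getD_of_contains_bound d2 k hb2 v2 0 c2
      rw [PySem.Dict.getD_of_not_contains d2 ((n : Nat) : Int) c12]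
      obtain ⟨b2l, b2u⟩ := getD_of_contains_bound d1 k hb1 v2 ((n : Nat) : Int) c21
      have hcd : cdelta P1 P2 v1 v2 = 0 := by simp [cdelta, hv, m1, m12, m21, m2]
      rw [hcd]
      split_ifs <;> omega
    · -- m1=False m12=False m21=True m2=False
      have c1 : d1.contains v1 = false := by rw [hk1 v1]; exact decide_eq_false m1
      have c2 : d2.contains v2 = false := by rw [hk2 v2]; exact decide_eq_false m2
      have c12 : d2.contains v1 = false := by rw [hk2 v1]; exact decide_eq_false m12
      have c21 : d1.contains v2 = true := by rw [hk1 v2]; exact decide_eq_true m21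
      have c1' : ¬ (d1.contains v1 = true) := by simp [c1]
      rw [if_neg c1']
      have c2' : ¬ (d2.contains v2 = true) := by simp [c2]
      rw [if_neg c2']
      rw [PySem.Dict.getD_insert_self d1 v1 ((k : Nat) : Int) 0]
      rw [PySem.Dict.getD_insert_of_ne d1 ((k : Nat) : Int) ((n : Nat) : Int) (Ne.symm hv)]
      rw [PySem.Dict.getD_insert_self d2 v2 ((k : Nat) : Int) 0]
      rw [PySem.Dict.getD_insert_of_ne d2 ((k : Nat) : Int) ((n : Nat) : Int) hv]
      rw [PySem.Dict.getD_of_not_contains d2 ((n : Nat) : Int) c12]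
      obtain ⟨b2l, b2u⟩ := getD_of_contains_bound d1 k hb1 v2 ((n : Nat) : Int) c21
      have hcd : cdelta P1 P2 v1 v2 = 1 := by simp [cdelta, hv, m1, m12, m21, m2]
      rw [hcd]
      split_ifs <;> omega
    · -- m1=False m12=False m21=False m2=True
      have c1 : d1.contains v1 = false := by rw [hk1 v1]; exact decide_eq_false m1
      have c2 : d2.contains v2 = true := by rw [hk2 v2]; exact decide_eq_true m2
      have c12 : d2.contains v1 = false := by rw [hk2 v1]; exact decide_eq_false m12
      have c21 : d1.contains v2 = false := by rw [hk1 v2]; exact decide_eq_false m21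
      have c1' : ¬ (d1.contains v1 = true) := by simp [c1]
      rw [if_neg c1']
      rw [if_pos c2]
      rw [PySem.Dict.getD_insert_self d1 v1 ((k : Nat) : Int) 0]
      rw [PySem.Dict.getD_insert_of_ne d1 ((k : Nat) : Int) ((n : Nat) : Int) (Ne.symm hv)]
      obtain ⟨a2l, a2u⟩ := getD_of_contains_bound d2 k hb2 v2 0 c2
      rw [PySem.Dict.getD_of_not_contains d2 ((n : Nat) : Int) c12]
      rw [PySem.Dict.getD_of_not_contains d1 ((n : Nat) : Int) c21]
      have hcd : cdelta P1 P2 v1 v2 = 0 := by simp [cdelta, hv, m1, m12, m21, m2]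
      rw [hcd]
      split_ifs <;> omega
    · -- m1=False m12=False m21=False m2=False
      have c1 : d1.contains v1 = false := by rw [hk1 v1]; exact decide_eq_false m1
      have c2 : d2.contains v2 = false := by rw [hk2 v2]; exact decide_eq_false m2
      have c12 : d2.contains v1 = false := by rw [hk2 v1]; exact decide_eq_false m12
      have c21 : d1.contains v2 = false := by rw [hk1 v2]; exact decide_eq_false m21
      have c1' : ¬ (d1.contains v1 = true) := by simp [c1]
      rw [if_neg c1']
      have c2' : ¬ (d2.contains v2 = true) := by simp [c2]
      rw [if_neg c2']
      rw [PySem.Dict.getD_insert_self d1 v1 ((k : Nat) : Int) 0]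
      rw [PySem.Dict.getD_insert_of_ne d1 ((k : Nat) : Int) ((n : Nat) : Int) (Ne.symm hv)]
      rw [PySem.Dict.getD_insert_self d2 v2 ((k : Nat) : Int) 0]
      rw [PySem.Dict.getD_insert_of_ne d2 ((k : Nat) : Int) ((n : Nat) : Int) hv]
      rw [PySem.Dict.getD_of_not_contains d2 ((n : Nat) : Int) c12]
      rw [PySem.Dict.getD_of_not_contains d1 ((n : Nat) : Int) c21]
      have hcd : cdelta P1 P2 v1 v2 = 0 := by simp [cdelta, hv, m1, m12, m21, m2]
      rw [hcd]
      split_ifs <;> omega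

-- length of a Nodup list filtered by 'p x or x == v'
theorem filter_or_beq_length (l : List Int) (hnd : l.Nodup) (p : Int → Bool) (v : Int) :
    (l.filter (fun x => p x || x == v)).length
      = (l.filter p).length + (if v ∈ l ∧ p v = false then 1 else 0) := by
  induction l with
  | nil => simp
  | cons y t ih =>
    rw [List.nodup_cons] at hnd
    obtain ⟨hy, hnd⟩ := hnd
    have iht := ih hnd
    by_cases hyv : y = v
    · subst hyv
      cases hp : p y <;>
        simp [List.filter_cons, hp, iht, hy] <;> omega
    · cases hp : p y <;>
        simp [List.filter_cons, hp, iht, hyv, Ne.symm hyv] <;>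
        split_ifs <;> simp_all <;> omega

theorem contains_add_eq (s : PySem.Set Int) (v x : Int) :
    (PySem.Set.add s v).contains x = (s.contains x || x == v) := by
  by_cases h : v ∈ s <;> by_cases hx : x = v <;>
    simp [PySem.Set.add, PySem.Set.contains, h, hx]

-- the intersection-size recurrence: adding v1 to set 1 and v2 to set 2
theorem inter_card_step (S1 S2 : PySem.Set Int) (h1 : S1.Nodup) (P1 P2 : List Int)
    (hm1 : ∀ x, x ∈ S1 ↔ x ∈ P1) (hm2 : ∀ x, x ∈ S2 ↔ x ∈ P2) (v1 v2 : Int) :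
    ((PySem.Set.inter (PySem.Set.add S1 v1) (PySem.Set.add S2 v2)).length : Int)
      = ((PySem.Set.inter S1 S2).length : Int) + cdelta P1 P2 v1 v2 := by
  have hfil : ∀ (L : PySem.Set Int),
      PySem.Set.inter L (PySem.Set.add S2 v2) = L.filter (fun x => S2.contains x || x == v2) := by
    intro L
    exact List.filter_congr (fun x _ => contains_add_eq S2 v2 x)
  have hSc : ∀ x, S2.contains x = decide (x ∈ P2) := by
    intro x
    by_cases hx : x ∈ P2
    · simp only [hx, decide_true]
      exact (PySem.Set.contains_iff S2 x).2 ((hm2 x).2 hx)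
    · simp only [hx, decide_false]
      exact Bool.eq_false_iff.2 (fun hc => hx ((hm2 x).1 ((PySem.Set.contains_iff S2 x).1 hc)))
  have hbase : (S1.filter (fun x => S2.contains x || x == v2)).length
      = (PySem.Set.inter S1 S2).length + (if v2 ∈ P1 ∧ v2 ∉ P2 then 1 else 0) := by
    rw [filter_or_beq_length S1 h1 _ v2]
    unfold PySem.Set.inter
    congr 1
    rw [hSc v2]
    by_cases h2' : v2 ∈ P2 <;> by_cases h1' : v2 ∈ P1 <;>
      simp [h2', h1', hm1 v2]
  by_cases hv1 : v1 ∈ S1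
  · rw [PySem.Set.add_of_mem hv1, hfil, hbase]
    have m1 : v1 ∈ P1 := (hm1 v1).1 hv1
    unfold cdelta
    by_cases hv : v1 = v2
    · subst hv
      by_cases h2' : v1 ∈ P2 <;> simp [m1, h2'] <;> omega
    · by_cases h2' : v2 ∈ P2 <;> by_cases h1' : v2 ∈ P1 <;>
        simp [m1, hv, h2', h1'] <;> omega
  · rw [PySem.Set.add_of_not_mem hv1, hfil, List.filter_append, List.length_append, hbase]
    have m1 : v1 ∉ P1 := fun h => hv1 ((hm1 v1).2 h)
    have hlast : (List.filter (fun x => S2.contains x || x == v2) [v1]).length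
        = if v1 ∈ P2 ∨ v1 = v2 then 1 else 0 := by
      cases hb : (v1 == v2) with
      | true =>
        have hv : v1 = v2 := beq_iff_eq.1 hb
        simp [List.filter, hSc v1, hb, hv]
      | false =>
        have hv : v1 ≠ v2 := fun h => by simp [h] at hb
        by_cases h2' : v1 ∈ P2 <;> simp [List.filter, hSc v1, hm2 v1, hb, h2', hv]
    rw [hlast]
    unfold cdelta
    by_cases hv : v1 = v2
    · subst hv
      by_cases h2' : v1 ∈ P2 <;> simp [m1, h2'] <;> omega
    · by_cases h2' : v1 ∈ P2 <;> by_cases h1' : v2 ∈ P1 <;> by_cases h2'' : v2 ∈ P2 <;>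
        simp [m1, hv, h2', h1', h2''] <;> omega

theorem prefC_zero (arr1 arr2 : List Int) : prefC arr1 arr2 0 = 0 := by
  simp [prefC, PySem.Set.ofList, PySem.Set.inter]

theorem prefC_succ (arr1 arr2 : List Int) (k : Nat) (h1 : k < arr1.length) (h2 : k < arr2.length) :
    prefC arr1 arr2 (k + 1)
      = prefC arr1 arr2 k + cdelta (arr1.take k) (arr2.take k) (arr1.getD k 0) (arr2.getD k 0) := by
  have ht1 : arr1.take (k + 1) = arr1.take k ++ [arr1.getD k 0] := by
    rw [List.take_add_one, List.getElem?_eq_getElem h1]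
    simp [List.getD_eq_getElem?_getD, List.getElem?_eq_getElem, h1]
  have ht2 : arr2.take (k + 1) = arr2.take k ++ [arr2.getD k 0] := by
    rw [List.take_add_one, List.getElem?_eq_getElem h2]
    simp [List.getD_eq_getElem?_getD, List.getElem?_eq_getElem, h2]
  unfold prefC
  rw [ht1, ht2, PySem.Set.ofList_append_singleton, PySem.Set.ofList_append_singleton]
  exact inter_card_step _ _ (PySem.Set.nodup_ofList _) (arr1.take k) (arr2.take k)
    (fun x => PySem.Set.mem_ofList _ x) (fun x => PySem.Set.mem_ofList _ x) _ _

-- the invariant carried through A's loop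
def AInv (arr1 arr2 : List Int) (n k : Nat)
    (sa : List Int × PySem.Dict Int Int × PySem.Dict Int Int) : Prop :=
  sa.1 = (List.range k).map (fun i => prefC arr1 arr2 (i + 1)) ++ List.replicate (n - k) 0
  ∧ (∀ x, sa.2.1.contains x = decide (x ∈ arr1.take k))
  ∧ (∀ x, sa.2.2.contains x = decide (x ∈ arr2.take k))
  ∧ (∀ x j, sa.2.1.get? x = some j → 0 ≤ j ∧ j < (k : Int))
  ∧ (∀ x j, sa.2.2.get? x = some j → 0 ≤ j ∧ j < (k : Int))

theorem AInv_step (arr1 arr2 : List Int) (k : Nat)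
    (hk : k < arr1.length) (hle : arr1.length ≤ arr2.length)
    (sa : List Int × PySem.Dict Int Int × PySem.Dict Int Int)
    (h : AInv arr1 arr2 arr1.length k sa) :
    AInv arr1 arr2 arr1.length (k + 1) (calcStepA arr1 arr2 arr1.length sa k) := by
  obtain ⟨resA, d1, d2⟩ := sa
  obtain ⟨hres, hk1, hk2, hb1, hb2⟩ := h
  dsimp only at hres hk1 hk2 hb1 hb2
  have hk2' : k < arr2.length := lt_of_lt_of_le hk hle
  have ht1 : arr1.take (k + 1) = arr1.take k ++ [arr1.getD k 0] := by
    rw [List.take_add_one, List.getElem?_eq_getElem hk]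
    simp [List.getD_eq_getElem?_getD, hk]
  have ht2 : arr2.take (k + 1) = arr2.take k ++ [arr2.getD k 0] := by
    rw [List.take_add_one, List.getElem?_eq_getElem hk2']
    simp [List.getD_eq_getElem?_getD, hk2']
  have hcnt := cntA_eq d1 d2 (arr1.take k) (arr2.take k) k arr1.length hk hk1 hk2 hb1 hb2
    (arr1.getD k 0) (arr2.getD k 0)
  dsimp only at hcnt
  have hsucc := prefC_succ arr1 arr2 k hk hk2'
  have hlen : ((List.range k).map (fun i => prefC arr1 arr2 (i + 1))).length = k := by simp
  have hresB : resA = (List.range k).map (fun i => prefC arr1 arr2 (i + 1))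
      ++ (0 : Int) :: List.replicate (arr1.length - k - 1) 0 := by
    rw [hres, show arr1.length - k = (arr1.length - k - 1) + 1 by omega, List.replicate_succ]
    simp
  have hget_k : resA.getD k 0 = 0 := by
    rw [hresB, List.getD_append_right _ _ _ _ (by omega)]
    simp [hlen]
  have hget_prev : 0 < k → resA.getD (k - 1) 0 = prefC arr1 arr2 k := by
    intro hpos
    rw [hresB, List.getD_append _ _ _ _ (by omega)]
    rw [List.getD_eq_getElem?_getD]
    have hk1' : k - 1 < k := by omega
    simp only [List.getElem?_map, List.getElem?_range hk1']
    simp only [Option.map_some, Option.getD_some]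
    congr 1
    omega
  have hset : ∀ v : Int, resA.set k v = (List.range k).map (fun i => prefC arr1 arr2 (i + 1))
      ++ v :: List.replicate (arr1.length - k - 1) 0 := by
    intro v
    rw [hresB, List.set_append_right _ _ (by omega : ((List.range k).map (fun i => prefC arr1 arr2 (i + 1))).length ≤ k)]
    simp [hlen]
  unfold AInv calcStepA
  simp only [PySem.List.pyGetD_natCast, PySem.List.pySetD_natCast]
  refine ⟨?_, ?_, ?_, ?_, ?_⟩
  · -- the result list
    by_cases hk0 : k = 0
    · subst hk0
      rw [if_neg (by omega)]
      rw [hget_k, hset]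
      rw [zero_add, hcnt]
      have h1 : prefC arr1 arr2 1
          = cdelta (arr1.take 0) (arr2.take 0) (arr1.getD 0 0) (arr2.getD 0 0) := by
        rw [hsucc, prefC_zero, zero_add]
      rw [← h1]
      simp [List.range_succ, Nat.sub_sub]
    · rw [if_pos (by omega : ((k : Nat) : Int) > 0),
        show ((k : Nat) : Int) - 1 = (((k - 1 : Nat)) : Int) by omega]
      simp only [PySem.List.pyGetD_natCast]
      rw [hget_k, hget_prev (by omega), hset, List.getD_append_right _ _ _ _ (by omega)]
      simp only [hlen, Nat.sub_self, List.getD_cons_zero]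
      rw [List.set_append_right _ _ (by omega : ((List.range k).map (fun i => prefC arr1 arr2 (i + 1))).length ≤ k)]
      simp only [hlen, Nat.sub_self, List.set_cons_zero]
      rw [zero_add, hcnt, ← hsucc]
      rw [List.range_succ, List.map_append]
      simp [Nat.sub_sub]
  · -- first dict membership characterisation
    intro x
    rw [ht1]
    exact contains_condInsert_mem d1 (arr1.take k) hk1 (arr1.getD k 0) ((k : Nat) : Int) x
  · intro x
    rw [ht2]
    exact contains_condInsert_mem d2 (arr2.take k) hk2 (arr2.getD k 0) ((k : Nat) : Int) x
  · exact bound_condInsert d1 k hb1 (arr1.getD k 0)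
  · exact bound_condInsert d2 k hb2 (arr2.getD k 0)

theorem AInv_main (arr1 arr2 : List Int) (hle : arr1.length ≤ arr2.length) (k : Nat)
    (hk : k ≤ arr1.length) :
    AInv arr1 arr2 arr1.length k
      ((List.range k).foldl (calcStepA arr1 arr2 arr1.length)
        (List.replicate arr1.length 0, PySem.Dict.empty, PySem.Dict.empty)) := by
  induction k with
  | zero =>
    refine ⟨by simp, ?_, ?_, ?_, ?_⟩ <;>
      simp [PySem.Dict.contains_empty, PySem.Dict.get?_empty]
  | succ k ih =>
    rw [List.range_succ, List.foldl_append]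
    exact AInv_step arr1 arr2 k (by omega) hle _ (ih (by omega))

-- B's comprehension computes exactly prefC (i+1) at position i
theorem alt_eq_map_prefC (arr1 arr2 : List Int) :
    calc_nums_alt arr1 arr2 = (List.range arr1.length).map (fun i => prefC arr1 arr2 (i + 1)) := by
  unfold calc_nums_alt
  rw [PySem.List.pyRange_zero_natCast, List.map_map]
  refine List.map_congr_left ?_
  intro k _
  have hcast : ((k : Int) + 1) = (((k + 1 : Nat)) : Int) := by push_cast; ring
  simp only [Function.comp, hcast, PySem.List.slice_to_natCast]
  rfl

-- ===== VERDICT (by name: the statement is the Claim_ definition above) =====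
theorem calc_nums_spec : Claim_equal_calc_nums := by
  intro arr1 arr2 _ hpre
  have hle : arr1.length ≤ arr2.length := hpre
  unfold Spec_calc_nums calc_nums
  obtain ⟨h1, _⟩ := AInv_main arr1 arr2 hle arr1.length (le_refl _)
  rw [alt_eq_map_prefC]
  simpa using h1
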